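-- pv_equiv track=rewrite | github.com/yashbhalerao5015/python_assignments | Q25.py | productNonRepeated
-- ===== SOURCE A (Python) =====
-- def productNonRepeated(arr):
--     unique = dict()
--
--     for num in arr:
--         if num in unique:
--             unique[num] = unique.get(num)+1
--         else:
--             unique[num] = 1
--
--     list1=[]
--
--     for key in unique:
--         if unique.get(key) == 1:
--             list1.append(key)
--
--     mult=1
--     for lis in list1:
--         mult*=lis
--
--     return mult
-- ===== SOURCE B (Python) =====
-- def productNonRepeated(arr):
--     mult = 1
--     run = None
--     cnt = 0
--     for x in sorted(arr):
--         if x == run: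
--             cnt += 1
--         else:
--             if cnt == 1:
--                 mult *= run
--             run = x
--             cnt = 1
--     if cnt == 1:
--         mult *= run
--     return mult
-- ===== Notes on version B (the rewrite author's own statement) =====
-- stated objective: alternative
-- what changed: Replaced A's dict-based occurrence counting (build counts, filter keys with count 1, multiply) by sorting a copy of the list and multiplying in a single run-length scan over adjacent equal elements.
import Mathlib
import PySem

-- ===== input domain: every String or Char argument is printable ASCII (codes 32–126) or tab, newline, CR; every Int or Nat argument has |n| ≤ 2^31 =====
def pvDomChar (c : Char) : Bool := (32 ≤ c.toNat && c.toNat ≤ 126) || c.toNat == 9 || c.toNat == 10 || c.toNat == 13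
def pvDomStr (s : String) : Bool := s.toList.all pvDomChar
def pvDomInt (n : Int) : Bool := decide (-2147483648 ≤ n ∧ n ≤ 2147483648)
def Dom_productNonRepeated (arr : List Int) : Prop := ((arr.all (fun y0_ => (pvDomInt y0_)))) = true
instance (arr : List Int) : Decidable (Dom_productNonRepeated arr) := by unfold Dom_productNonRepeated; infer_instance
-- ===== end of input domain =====

-- B replaces A's dict-based occurrence counting (count, filter keys, multiply) by
-- sort + one run-length scan (objective: alternative; same product, multiplication is commutative).

-- ===== PORT A =====
def productNonRepeated (arr : List Int) : Int :=
  -- for num in arr: count occurrences in the dict 'unique'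
  -- ('unique.get(num)+1' is ported as 'getD num 0 + 1': the branch guarantees the key is present)
  let unique : PySem.Dict Int Int := arr.foldl
    (fun d num => if d.contains num then d.insert num (d.getD num 0 + 1) else d.insert num 1)
    PySem.Dict.empty
  -- for key in unique: collect keys whose count is 1
  let list1 : List Int := unique.keys.foldl
    (fun acc key => if unique.get? key == some 1 then acc ++ [key] else acc) []
  -- for lis in list1: mult *= lis
  list1.foldl (fun mult lis => mult * lis) 1

-- ===== PORT B =====
-- the body of B's for loop; state (mult, run, cnt), run = none is Python's run = None
def pnrStep (st : Int × Option Int × Int) (x : Int) : Int × Option Int × Int :=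
  if some x == st.2.1 then (st.1, st.2.1, st.2.2 + 1)
  else ((if st.2.2 == 1 then st.1 * st.2.1.getD 0 else st.1), some x, 1)

def productNonRepeated_alt (arr : List Int) : Int :=
  -- 'mult *= run' fires only when cnt == 1, where run is some _; '.getD 0' is unreachable then
  let st := (PySem.List.sorted arr (fun x => x) false).foldl pnrStep (1, none, 0)
  if st.2.2 == 1 then st.1 * st.2.1.getD 0 else st.1

-- ===== PRECONDITION & SPEC =====
def Spec_productNonRepeated (arr : List Int) (out : Int) : Prop := out = productNonRepeated_alt arr
instance (arr : List Int) (out : Int) : Decidable (Spec_productNonRepeated arr out) := by unfold Spec_productNonRepeated; infer_instance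

-- ===== CLAIM (what is proved, stated in full; the proofs are below) =====
def Claim_equal_productNonRepeated : Prop := ∀ (arr : List Int), Dom_productNonRepeated arr → Spec_productNonRepeated arr (productNonRepeated arr)

-- ===== LEMMAS AND PROOFS =====

-- the common anchor: the product of the elements occurring exactly once in l
def prodOnce (l : List Int) : Int := (l.filter (fun y => decide (l.count y = 1))).prod

lemma pnrA_counter (arr : List Int) :
    arr.foldl (fun d num => if d.contains num then d.insert num (d.getD num 0 + 1) else d.insert num 1)
      PySem.Dict.empty = PySem.Dict.counter arr := by
  have hf : (fun (d : PySem.Dict Int Int) num => if d.contains num then d.insert num (d.getD num 0 + 1) else d.insert num 1)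
      = fun d x => d.insert x (d.getD x 0 + 1) := by
    funext d x
    by_cases h : d.contains x
    · simp [h]
    · have h' : d.contains x = false := by simpa using h
      rw [PySem.Dict.getD_of_not_contains d 0 h']
      simp [h']
  rw [hf, PySem.Dict.foldl_insert_getD_add_one_eq_counter]

lemma counter_get? (arr : List Int) {k : Int} (hk : k ∈ arr) :
    (PySem.Dict.counter arr).get? k = some ((arr.count k : Int)) := by
  apply PySem.Dict.get?_of_mem_items
  · rw [PySem.Dict.items_counter]
    exact List.mem_map.mpr ⟨k, (PySem.Set.mem_ofList arr k).mpr hk, rfl⟩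
  · exact PySem.Dict.nodup_keys_counter arr

lemma filter_once_nodup (arr : List Int) :
    (arr.filter (fun y => decide (arr.count y = 1))).Nodup := by
  rw [List.nodup_iff_count_le_one]
  intro a
  by_cases h : arr.count a = 1
  · rw [List.count_filter (by simpa using h)]
    omega
  · rw [List.count_eq_zero.mpr (by simp [List.mem_filter, h])]
    omega

lemma set_filter_perm (arr : List Int) :
    ((PySem.Set.ofList arr).filter (fun y => decide (arr.count y = 1))).Perm
      (arr.filter (fun y => decide (arr.count y = 1))) := by
  rw [List.perm_ext_iff_of_nodup ((PySem.Set.nodup_ofList arr).filter _) (filter_once_nodup arr)]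
  intro a
  simp [List.mem_filter, PySem.Set.mem_ofList]

lemma pnrA_eq (arr : List Int) : productNonRepeated arr = prodOnce arr := by
  unfold productNonRepeated
  dsimp only
  rw [pnrA_counter arr]
  rw [PySem.List.foldl_append_if_eq_filter (fun key => (PySem.Dict.counter arr).get? key == some 1)]
  rw [List.nil_append, PySem.Dict.keys_counter]
  have hpred : List.filter (fun key => (PySem.Dict.counter arr).get? key == some 1) (PySem.Set.ofList arr)
      = List.filter (fun y => decide (arr.count y = 1)) (PySem.Set.ofList arr) := by
    apply List.filter_congr
    intro k hk
    rw [counter_get? arr ((PySem.Set.mem_ofList arr k).mp hk)]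
    by_cases h : arr.count k = 1
    · simp [h]
    · have h2 : ((arr.count k : Int)) ≠ 1 := by exact_mod_cast h
      simp [h, h2]
  rw [hpred, prodOnce, ← (set_filter_perm arr).prod_eq, List.prod_eq_foldl]

lemma pnrB_fold (s : List Int) :
    ∀ (m a c : Int), s.Pairwise (· ≤ ·) → 1 ≤ c → (∀ y ∈ s, a ≤ y) →
    (fun st : Int × Option Int × Int => if st.2.2 == 1 then st.1 * st.2.1.getD 0 else st.1)
        (s.foldl pnrStep (m, some a, c))
      = (if c = 1 ∧ s.count a = 0 then m * a else m)
          * (s.filter (fun y => decide (y ≠ a ∧ s.count y = 1))).prod := by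
  induction s with
  | nil =>
    intro m a c hs hc ha
    simp only [List.foldl_nil, List.count_nil, List.filter_nil, List.prod_nil, mul_one]
    by_cases h : c = 1
    · simp [h]
    · simp [h, beq_iff_eq]
  | cons x t ih =>
    intro m a c hs hc ha
    have hpt : t.Pairwise (· ≤ ·) := hs.of_cons
    have hxt : ∀ y ∈ t, x ≤ y := fun y hy => (List.pairwise_cons.mp hs).1 y hy
    by_cases hxa : x = a
    · subst hxa
      have hstep : pnrStep (m, some x, c) x = (m, some x, c + 1) := by
        simp [pnrStep]
      rw [List.foldl_cons, hstep]
      rw [ih m x (c + 1) hpt (by omega) hxt]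
      have hcnt : (x :: t).count x = t.count x + 1 := by simp
      have h1 : ¬ (c + 1 = 1 ∧ t.count x = 0) := by omega
      have h2 : ¬ (c = 1 ∧ (x :: t).count x = 0) := by rw [hcnt]; omega
      rw [if_neg h1, if_neg h2]
      congr 1
      rw [List.filter_cons]
      simp only [ne_eq, not_true_eq_false, false_and, decide_false, Bool.false_eq_true, if_false]
      congr 1
      apply List.filter_congr
      intro y hy
      by_cases hyx : y = x
      · simp [hyx]
      · simp [hyx, Ne.symm hyx]
    · have hax : a < x := lt_of_le_of_ne (ha x (List.mem_cons_self)) (fun h => hxa h.symm)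
      have hta : t.count a = 0 := List.count_eq_zero.mpr (fun h => absurd (hxt a h) (not_le.mpr hax))
      have hcnta : (x :: t).count a = 0 := by simp [hta, hxa]
      have hstep : pnrStep (m, some a, c) x
          = ((if c == 1 then m * a else m), some x, 1) := by
        simp [pnrStep, hxa]
      rw [List.foldl_cons, hstep]
      rw [ih _ x 1 hpt le_rfl hxt]
      have hm' : (if (c == 1) = true then m * a else m) = (if c = 1 ∧ (x :: t).count a = 0 then m * a else m) := by
        rw [hcnta]
        by_cases h : c = 1 <;> simp [h]
      have hcx : (x :: t).count x = t.count x + 1 := by simp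
      have hfe : t.filter (fun y => decide (y ≠ a ∧ (x :: t).count y = 1))
          = t.filter (fun y => decide (y ≠ x ∧ t.count y = 1)) := by
        apply List.filter_congr
        intro y hy
        by_cases hyx : y = x
        · subst hyx
          have hpos : 0 < t.count y := List.count_pos_iff.mpr hy
          simp
          omega
        · have hya : y ≠ a := ne_of_gt (lt_of_lt_of_le hax (hxt y hy))
          simp [hya, hyx, Ne.symm hyx]
      rw [List.filter_cons, hfe, ← hm']
      by_cases h0 : t.count x = 0
      · have : (decide (x ≠ a ∧ (x :: t).count x = 1)) = true := by
          simp [hxa, hcx, h0]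
        rw [this]
        simp only [h0, and_true, if_true, List.prod_cons]
        ring
      · have : (decide (x ≠ a ∧ (x :: t).count x = 1)) = false := by
          simp [hcx]
          omega
        rw [this]
        simp only [h0, and_false, Bool.false_eq_true, if_false]

lemma prodOnce_perm {l l' : List Int} (h : l.Perm l') : prodOnce l = prodOnce l' := by
  unfold prodOnce
  calc (l.filter (fun y => decide (l.count y = 1))).prod
      = (l'.filter (fun y => decide (l.count y = 1))).prod := (h.filter _).prod_eq
    _ = (l'.filter (fun y => decide (l'.count y = 1))).prod := by
        rw [List.filter_congr (fun y _ => by rw [h.count_eq])]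

lemma pnrB_eq (arr : List Int) : productNonRepeated_alt arr = prodOnce arr := by
  unfold productNonRepeated_alt
  dsimp only
  have hkey : ∀ (s : List Int), s.Pairwise (· ≤ ·) →
      (if ((s.foldl pnrStep (1, none, 0)).2.2 == 1) = true then
        (s.foldl pnrStep (1, none, 0)).1 * (s.foldl pnrStep (1, none, 0)).2.1.getD 0
      else (s.foldl pnrStep (1, none, 0)).1) = prodOnce s := by
    intro s hp
    cases s with
    | nil => simp [prodOnce]
    | cons x t =>
      have hstep : pnrStep (1, none, 0) x = (1, some x, 1) := by simp [pnrStep]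
      have hfold := pnrB_fold t 1 x 1 hp.of_cons le_rfl (fun y hy => (List.pairwise_cons.mp hp).1 y hy)
      dsimp only at hfold
      rw [List.foldl_cons, hstep, hfold]
      have hcx : (x :: t).count x = t.count x + 1 := by simp
      have hfe : t.filter (fun y => decide ((x :: t).count y = 1))
          = t.filter (fun y => decide (y ≠ x ∧ t.count y = 1)) := by
        apply List.filter_congr
        intro y hy
        by_cases hyx : y = x
        · subst hyx
          have hpos : 0 < t.count y := List.count_pos_iff.mpr hy
          simp
          omega
        · simp [hyx, Ne.symm hyx]
      rw [prodOnce, List.filter_cons, hfe]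
      by_cases h0 : t.count x = 0
      · have hL : (1 : Int) = 1 ∧ t.count x = 0 := ⟨rfl, h0⟩
        have hR : decide ((x :: t).count x = 1) = true := by simp [hcx, h0]
        rw [if_pos hL, if_pos hR, List.prod_cons]
        ring
      · have hL : ¬ ((1 : Int) = 1 ∧ t.count x = 0) := fun h => h0 h.2
        have hR : ¬ (decide ((x :: t).count x = 1) = true) := by simp [hcx]; omega
        rw [if_neg hL, if_neg hR]
        ring
  rw [hkey _ (PySem.List.sorted_pairwise arr (fun x => x))]
  exact prodOnce_perm (PySem.List.sorted_perm arr (fun x => x) false)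

-- ===== VERDICT (by name: the statement is the Claim_ definition above) =====
theorem productNonRepeated_spec : Claim_equal_productNonRepeated := by
  intro arr _
  unfold Spec_productNonRepeated
  rw [pnrA_eq, pnrB_eq]
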